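-- pv_equiv track=rewrite | github.com/HichTala/draw2 | draw/utils.py | parse_deck_list
-- ===== SOURCE A (Python) =====
-- def parse_deck_list(message, dl):
--     pattern = '\\"serial_number\\":\\"'
--     if pattern not in message:
--         return dl
--     start = message.find(pattern) + len(pattern)
--     message = message[start:]
--     pattern = '\\",'
--     end = message.find(pattern)
--     serial_number = message[:end]
--     dl.append(serial_number)
--
--     message = message[end:]
--     return parse_deck_list(message, dl)
-- ===== SOURCE B (Python) =====
-- def parse_deck_list(message, dl):
--     pattern = '\\"serial_number\\":\\"'
--     close = '\\",'
--     pos = message.find(pattern)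
--     while pos != -1:
--         start = pos + len(pattern)
--         end = message.find(close, start)
--         if end == -1:
--             dl.append(message[start:])
--             break
--         dl.append(message[start:end])
--         pos = message.find(pattern, end)
--     return dl
-- ===== Notes on version B (the rewrite author's own statement) =====
-- stated objective: alternative
-- what changed: Replaces A's recursion that re-slices the remaining message after every match with a single iterative scan over the original string using start-offset find calls (no intermediate copies); on the measured random inputs matches are rare, so both are dominated by C-level find and run at the same speed.
-- intended difference: On messages where a scanned '\"serial_number\":\"' occurrence is never closed by '\",' and text follows it, A appends that trailing value with its last character chopped off (find's -1 used as a slice end), while B appends the whole trailing value, which is the intended full serial number. — e.g. on parse_deck_list("\\\"serial_number\\\":\\\"AB", []): A returns ["A"], B returns ["AB"]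
import Mathlib
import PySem

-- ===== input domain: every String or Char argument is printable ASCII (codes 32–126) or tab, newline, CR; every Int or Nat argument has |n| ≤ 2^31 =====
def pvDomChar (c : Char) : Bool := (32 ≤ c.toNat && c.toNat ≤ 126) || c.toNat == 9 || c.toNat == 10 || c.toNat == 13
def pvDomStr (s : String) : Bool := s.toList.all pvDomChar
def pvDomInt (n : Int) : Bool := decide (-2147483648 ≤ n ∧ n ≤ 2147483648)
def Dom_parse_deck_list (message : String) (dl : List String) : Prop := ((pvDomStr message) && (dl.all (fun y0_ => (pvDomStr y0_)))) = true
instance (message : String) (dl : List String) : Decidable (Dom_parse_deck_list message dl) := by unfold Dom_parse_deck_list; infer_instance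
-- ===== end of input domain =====

-- B replaces A's slice-and-recurse scan by a single loop over absolute indices with
-- start-offset find (no re-slicing of the message); the equivalence proved is about
-- the RETURN value (both Pythons also append the same strings to dl in place), and
-- on unterminated trailing values A and B intentionally differ (see D_ below).

-- ===== PORT A =====
-- '\\"serial_number\\":\\"' and '\\",' as Python sees them
def pvPat : List Char := "\\\"serial_number\\\":\\\"".toList
def pvClose : List Char := "\\\",".toList

-- literal port of A's recursion (message handled as its list of chars)
def parseDeckRec (msg : List Char) (dl : List String) : List String :=
  if PySem.Chars.isIn pvPat msg then
    let start := PySem.Chars.find msg pvPat + PySem.Chars.len pvPat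
    let msg1 := PySem.List.slice msg (some start) none
    let e := PySem.Chars.find msg1 pvClose
    let serial := PySem.List.slice msg1 none (some e)
    parseDeckRec (PySem.List.slice msg1 (some e) none) (dl ++ [String.ofList serial])
  else dl
termination_by msg.length
decreasing_by
  rename_i h
  have hinf : pvPat <:+: msg := (PySem.Chars.isIn_iff_infix _ _).mp h
  have h20 : 20 ≤ msg.length := by
    have := hinf.length_le; simpa [pvPat] using this
  have hf : 0 ≤ PySem.Chars.find msg pvPat := (PySem.Chars.find_nonneg_iff _ _).mpr hinf
  have hl : PySem.Chars.len pvPat = 20 := by decide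
  have hs : PySem.List.slice msg (some (PySem.Chars.find msg pvPat + PySem.Chars.len pvPat)) none
      = msg.drop (PySem.Chars.find msg pvPat + PySem.Chars.len pvPat).toNat :=
    PySem.List.slice_from msg (by omega)
  rw [PySem.List.slice_some_none, hs]
  simp only [List.length_drop]
  omega

def parse_deck_list (message : String) (dl : List String) : List String :=
  parseDeckRec message.toList dl

-- ===== PORT B =====
-- literal port of B's while loop; fuel only makes the loop total (it never runs out:
-- pos advances by ≥ len(pattern) each iteration, see pv_loop_eq_rec)
def parseDeckLoop (s : List Char) (fuel : Nat) (pos : Int) (dl : List String) : List String :=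
  match fuel with
  | 0 => dl
  | fuel + 1 =>
    if pos = -1 then dl
    else
      let start := pos + PySem.Chars.len pvPat
      let e := PySem.Chars.findFrom s pvClose start
      if e = -1 then dl ++ [String.ofList (PySem.List.slice s (some start) none)]
      else
        parseDeckLoop s fuel (PySem.Chars.findFrom s pvPat e)
          (dl ++ [String.ofList (PySem.List.slice s (some start) (some e))])

def parse_deck_list_alt (message : String) (dl : List String) : List String :=
  parseDeckLoop message.toList (message.toList.length + 1)
    (PySem.Chars.find message.toList pvPat) dl

-- ===== PRECONDITION & SPEC =====
-- On messages where a scanned '\"serial_number\":\"' occurrence is never closed by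
-- '\",' and text follows it, A appends that trailing value with its LAST CHARACTER
-- CHOPPED OFF (find's -1 used as a slice end), while B appends the whole trailing
-- value, which is the intended full serial number.
def D_parse_deck_list (message : String) (dl : List String) : Prop :=
  ∃ p ∈ List.range message.toList.length,
    pvPat <+: message.toList.drop p ∧ p + 20 < message.toList.length ∧
      ∀ e ∈ List.range message.toList.length, p + 20 ≤ e →
        ¬ (pvClose <+: message.toList.drop e)
instance (message : String) (dl : List String) : Decidable (D_parse_deck_list message dl) := by
  unfold D_parse_deck_list; infer_instance

def Spec_parse_deck_list (message : String) (dl : List String) (out : List String) : Prop :=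
  ¬ D_parse_deck_list message dl → out = parse_deck_list_alt message dl
instance (message : String) (dl : List String) (out : List String) : Decidable (Spec_parse_deck_list message dl out) := by unfold Spec_parse_deck_list; infer_instance

def pvDiffWitness_parse_deck_list : String × List String := ("\\\"serial_number\\\":\\\"AB", [])
def pvDiffWitnessOut_parse_deck_list : (List String) × (List String) := (["A"], ["AB"])

-- ===== CLAIM (what is proved, stated in full; the proofs are below) =====
def Claim_unchanged_parse_deck_list : Prop := ∀ (message : String) (dl : List String), Dom_parse_deck_list message dl → Spec_parse_deck_list message dl (parse_deck_list message dl)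
def Claim_changed_parse_deck_list : Prop := Dom_parse_deck_list (pvDiffWitness_parse_deck_list.1) (pvDiffWitness_parse_deck_list.2) ∧ D_parse_deck_list (pvDiffWitness_parse_deck_list.1) (pvDiffWitness_parse_deck_list.2) ∧ parse_deck_list (pvDiffWitness_parse_deck_list.1) (pvDiffWitness_parse_deck_list.2) = pvDiffWitnessOut_parse_deck_list.1 ∧ parse_deck_list_alt (pvDiffWitness_parse_deck_list.1) (pvDiffWitness_parse_deck_list.2) = pvDiffWitnessOut_parse_deck_list.2 ∧ pvDiffWitnessOut_parse_deck_list.1 ≠ pvDiffWitnessOut_parse_deck_list.2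

-- ===== LEMMAS AND PROOFS =====

theorem pv_rec_of_not_in (l : List Char) (dl : List String)
    (h : PySem.Chars.isIn pvPat l = false) : parseDeckRec l dl = dl := by
  rw [parseDeckRec, h]; simp

-- the core correspondence: outside D_ (hypothesis H: every scanned-from position with
-- an open pattern occurrence and room after it has a close), the loop at absolute
-- search index k computes what A's recursion computes on the suffix s.drop k
theorem pv_loop_eq_rec (s : List Char)
    (H : ∀ p, pvPat <+: s.drop p → p + 20 < s.length →
        ∃ e, e < s.length ∧ p + 20 ≤ e ∧ pvClose <+: s.drop e)
    (fuel : Nat) : ∀ (k : Nat) (dl : List String),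
    k ≤ s.length → s.length + 1 - k ≤ fuel →
    parseDeckLoop s fuel (PySem.Chars.findFrom s pvPat (k : Int)) dl
      = parseDeckRec (s.drop k) dl := by
  induction fuel with
  | zero => intro k dl hk hfu; omega
  | succ fuel ih =>
    intro k dl hk hfu
    rw [PySem.Chars.findFrom_natCast s pvPat k hk]
    by_cases hc : PySem.Chars.find (s.drop k) pvPat = -1
    · rw [if_pos hc, parseDeckLoop, if_pos rfl,
        pv_rec_of_not_in _ _ ((PySem.Chars.isIn_eq_false_iff _ _).mpr
          ((PySem.Chars.find_eq_neg_one_iff _ _).mp hc))]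
    · rw [if_neg hc]
      have hf0 : 0 ≤ PySem.Chars.find (s.drop k) pvPat := by
        have := PySem.Chars.neg_one_le_find (s.drop k) pvPat; omega
      set f := PySem.Chars.find (s.drop k) pvPat with hfdef
      obtain ⟨fn, hfn⟩ : ∃ fn : Nat, f = (fn : Int) := ⟨f.toNat, by omega⟩
      have hinf : pvPat <+: (s.drop k).drop fn := by
        have := (PySem.Chars.find_spec (s := s.drop k) (sub := pvPat) hf0).1
        rwa [← hfdef, hfn, Int.toNat_natCast] at this
      have h20 : k + fn + 20 ≤ s.length := by
        have hLL := hinf.length_le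
        have hpl : pvPat.length = 20 := by decide
        rw [hpl] at hLL
        simp only [List.length_drop] at hLL
        omega
      have hlp : PySem.Chars.len pvPat = 20 := by decide
      have hinA : PySem.Chars.isIn pvPat (s.drop k) = true := by
        rw [PySem.Chars.isIn_iff_infix]
        exact hinf.isInfix.trans (List.drop_suffix fn (s.drop k)).isInfix
      -- A side, one unfolding
      rw [parseDeckRec, if_pos hinA]
      dsimp only
      rw [← hfdef, hlp, hfn]
      have hsliceA : PySem.List.slice (s.drop k) (some ((fn : Int) + 20)) none
          = s.drop (k + (fn + 20)) := by
        rw [show ((fn : Int) + 20) = ((fn + 20 : Nat) : Int) by push_cast; ring,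
          PySem.List.slice_from _ (by omega), Int.toNat_natCast, List.drop_drop]
      rw [hsliceA]
      -- B side, one unfolding
      rw [parseDeckLoop]
      dsimp only
      rw [if_neg (by omega : ¬ ((k : Int) + (fn : Int) = -1))]
      rw [hlp]
      have hstart : (k : Int) + (fn : Int) + 20 = ((k + fn + 20 : Nat) : Int) := by
        push_cast; ring
      rw [hstart, PySem.Chars.findFrom_natCast s pvClose (k + fn + 20) h20]
      have hdk : s.drop (k + (fn + 20)) = s.drop (k + fn + 20) := by rw [Nat.add_assoc]
      rw [hdk]
      have hoccA : pvPat <+: s.drop (k + fn) := by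
        rwa [List.drop_drop] at hinf
      set g := PySem.Chars.find (s.drop (k + fn + 20)) pvClose with hgdef
      by_cases hg : g = -1
      · -- closing pattern absent: by H, the message must END right after the pattern
        have hnoc : ¬ pvClose <:+: s.drop (k + fn + 20) :=
          (PySem.Chars.find_eq_neg_one_iff _ _).mp (hgdef ▸ hg)
        have hend : k + fn + 20 = s.length := by
          by_contra hne
          obtain ⟨e, he1, he2, he3⟩ := H (k + fn) hoccA (by omega)
          exact hnoc (by
            have hde : s.drop e = (s.drop (k + fn + 20)).drop (e - (k + fn + 20)) := by
              rw [List.drop_drop]; congr 1; omega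
            rw [hde] at he3
            exact he3.isInfix.trans (List.drop_suffix _ _).isInfix)
        have hempty : s.drop (k + fn + 20) = [] := by
          rw [hend]; exact List.drop_length
        rw [hempty, hg,
          show PySem.List.slice ([] : List Char) (some (-1)) none = [] from rfl,
          show PySem.List.slice ([] : List Char) none (some (-1)) = [] from rfl,
          pv_rec_of_not_in _ _ (by decide),
          PySem.List.slice_from _ (Int.natCast_nonneg _), Int.toNat_natCast, hempty]
        simp
      · rw [if_neg hg]
        have hg0 : 0 ≤ g := by
          have := PySem.Chars.neg_one_le_find (s.drop (k + fn + 20)) pvClose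
          rw [← hgdef] at this; omega
        obtain ⟨gn, hgn⟩ : ∃ gn : Nat, g = (gn : Int) := ⟨g.toNat, by omega⟩
        have hgl : gn ≤ s.length - (k + fn + 20) := by
          have := PySem.Chars.find_le_length (s.drop (k + fn + 20)) pvClose
          rw [← hgdef, hgn] at this
          simp only [List.length_drop] at this
          omega
        rw [hgn]
        rw [if_neg (by omega : ¬ (((k + fn + 20 : Nat) : Int) + (gn : Int) = -1))]
        rw [PySem.List.slice_natCast_add]
        rw [show ((k + fn + 20 : Nat) : Int) + (gn : Int) = ((k + fn + 20 + gn : Nat) : Int)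
          by push_cast; ring]
        rw [PySem.List.slice_to _ (Int.natCast_nonneg gn), Int.toNat_natCast,
          PySem.List.slice_from _ (Int.natCast_nonneg gn), Int.toNat_natCast, List.drop_drop]
        rw [ih (k + fn + 20 + gn) _ (by omega) (by omega)]

-- ===== VERDICT (by name: the statements are the Claim_ definitions above) =====
theorem parse_deck_list_spec : Claim_unchanged_parse_deck_list := by
  intro message dl _
  unfold Spec_parse_deck_list
  intro hnd
  unfold parse_deck_list parse_deck_list_alt
  have H : ∀ p, pvPat <+: message.toList.drop p → p + 20 < message.toList.length →
      ∃ e, e < message.toList.length ∧ p + 20 ≤ e ∧ pvClose <+: message.toList.drop e := by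
    intro p hp hlt
    by_contra hcon
    push_neg at hcon
    apply hnd
    refine ⟨p, List.mem_range.mpr (by omega), hp, hlt, ?_⟩
    intro e he hpe
    exact hcon e (List.mem_range.mp he) hpe
  rw [← PySem.Chars.findFrom_zero,
    show (0 : Int) = ((0 : Nat) : Int) by norm_num,
    pv_loop_eq_rec message.toList H (message.toList.length + 1) 0 dl (by omega) (by omega)]
  simp

theorem parse_deck_list_changed : Claim_changed_parse_deck_list := by
  unfold Claim_changed_parse_deck_list
  refine ⟨by decide, by decide, ?_, by decide, by decide⟩
  unfold parse_deck_list pvDiffWitness_parse_deck_list pvDiffWitnessOut_parse_deck_list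
  rw [parseDeckRec]
  rw [parseDeckRec]
  decide
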